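-- pv_equiv track=rewrite | github.com/DocDanouBot/ICS5110 | code/paolo/DSSalariesanalysis.py | make_unique
-- ===== SOURCE A (Python) =====
-- def make_unique(column):
--     seen = set()
--     for idx, value in enumerate(column):
--         while value in seen:
--             value += 1  # Increment by 1 if already seen
--         seen.add(value)
--         column[idx] = value
--     return column
-- ===== SOURCE B (Python) =====
-- def make_unique(column):
--     # Union-find style "next free slot" dictionary with path compression:
--     # nxt[v] = candidate for the next free value at or above v.
--     # Like A, mutates column in place and returns it.
--     nxt = {}
--     for idx, value in enumerate(column):
--         path = []
--         v = value
--         while v in nxt: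
--             path.append(v)
--             v = nxt[v]
--         for p in path:
--             nxt[p] = v
--         column[idx] = v
--         nxt[v] = v + 1
--     return column
-- ===== Notes on version B (the rewrite author's own statement) =====
-- stated objective: faster
-- what changed: Replaces A's per-element linear rescan of the seen-set (while value in seen: value += 1) by a next-free-slot dictionary with path compression (union-find style), so each element jumps directly to its free value.
import Mathlib
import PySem

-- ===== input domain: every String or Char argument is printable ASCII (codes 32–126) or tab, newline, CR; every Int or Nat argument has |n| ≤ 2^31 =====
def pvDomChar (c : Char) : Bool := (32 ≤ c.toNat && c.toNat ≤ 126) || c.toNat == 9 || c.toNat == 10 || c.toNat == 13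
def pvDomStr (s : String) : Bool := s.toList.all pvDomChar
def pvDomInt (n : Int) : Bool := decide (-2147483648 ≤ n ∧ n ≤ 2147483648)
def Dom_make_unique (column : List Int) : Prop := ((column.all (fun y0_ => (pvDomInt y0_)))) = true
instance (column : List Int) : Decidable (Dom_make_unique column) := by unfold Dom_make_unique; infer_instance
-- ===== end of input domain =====

-- B replaces A's per-element rescan ("while value in seen: value += 1") by a "next free
-- slot" dictionary with path compression. Both Pythons mutate `column` in place and
-- return it; the equivalence proved here is about the returned value.

-- termination-measure lemmas, cited by the ports' decreasing_by
theorem pv_filter_len_mono (l : List Int) {v w : Int} (hvw : v ≤ w) :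
    (l.filter (fun x => decide (w ≤ x))).length ≤ (l.filter (fun x => decide (v ≤ x))).length := by
  induction l with
  | nil => simp
  | cons a t ih =>
    simp only [List.filter_cons, decide_eq_true_eq]
    split_ifs with h1 h2 h2 <;> (try simp only [List.length_cons]) <;> omega

theorem pv_filter_len_lt (l : List Int) {v w : Int} (hv : v ∈ l) (hvw : v < w) :
    (l.filter (fun x => decide (w ≤ x))).length < (l.filter (fun x => decide (v ≤ x))).length := by
  induction l with
  | nil => simp at hv
  | cons a t ih =>
    simp only [List.filter_cons, decide_eq_true_eq]
    rcases List.mem_cons.mp hv with rfl | hvt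
    · have hmono := pv_filter_len_mono t (le_of_lt hvw)
      split_ifs with h1 h2 h2 <;> (try simp only [List.length_cons]) <;> omega
    · have := ih hvt
      split_ifs with h1 h2 h2 <;> (try simp only [List.length_cons]) <;> omega

-- ===== PORT A =====
-- 'while value in seen: value += 1'
def bumpA (seen : PySem.Set Int) (value : Int) : Int :=
  if h : value ∈ seen then bumpA seen (value + 1) else value
termination_by (seen.filter (fun x => decide (value ≤ x))).length
decreasing_by exact pv_filter_len_lt seen h (by omega)

-- the 'for idx, value in enumerate(column)' loop; 'column[idx] = value' builds the output
def goA (seen : PySem.Set Int) : List Int → List Int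
  | [] => []
  | v :: rest =>
    let w := bumpA seen v
    w :: goA (PySem.Set.add seen w) rest

def make_unique (column : List Int) : List Int := goA PySem.Set.empty column

-- ===== PORT B =====
-- 'while v in nxt: path.append(v); v = nxt[v]' — returns (root, path).
-- The 'v < w' test is only a totality guard: in every dict B builds, values exceed keys.
def chaseB (nxt : PySem.Dict Int Int) (v : Int) : Int × List Int :=
  match h : nxt.get? v with
  | none => (v, [])
  | some w =>
    if hw : v < w then
      let p := chaseB nxt w
      (p.1, v :: p.2)
    else (v, [])
termination_by ((nxt.keys).filter (fun x => decide (v ≤ x))).length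
decreasing_by
  have hv : v ∈ nxt.keys := by
    by_contra hc
    rw [← PySem.Dict.get?_eq_none_iff_not_mem_keys] at hc
    simp [hc] at h
  exact pv_filter_len_lt nxt.keys hv hw

-- the main loop: find root, compress path ('for p in path: nxt[p] = v'), record next slot
def goB (nxt : PySem.Dict Int Int) : List Int → List Int
  | [] => []
  | value :: rest =>
    let rp := chaseB nxt value
    let nxt1 := rp.2.foldl (fun d p => d.insert p rp.1) nxt
    rp.1 :: goB (nxt1.insert rp.1 (rp.1 + 1)) rest

def make_unique_alt (column : List Int) : List Int := goB PySem.Dict.empty column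

-- ===== PRECONDITION & SPEC =====
def Spec_make_unique (column : List Int) (out : List Int) : Prop := out = make_unique_alt column
instance (column : List Int) (out : List Int) : Decidable (Spec_make_unique column out) := by unfold Spec_make_unique; infer_instance

-- ===== CLAIM (what is proved, stated in full; the proofs are below) =====
def Claim_equal_make_unique : Prop := ∀ (column : List Int), Dom_make_unique column → Spec_make_unique column (make_unique column)

-- ===== LEMMAS AND PROOFS =====

theorem bumpA_of_not_mem {s : List Int} {v : Int} (h : v ∉ s) : bumpA s v = v := by
  rw [bumpA]; simp [h]

theorem bumpA_of_mem {s : List Int} {v : Int} (h : v ∈ s) : bumpA s v = bumpA s (v + 1) := by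
  rw [bumpA]; simp [h]

theorem bumpA_ge (s : List Int) (v : Int) : v ≤ bumpA s v := by
  refine bumpA.induct s (fun u => u ≤ bumpA s u) ?_ ?_ v
  · intro x hx ih; rw [bumpA_of_mem hx]; omega
  · intro x hx; rw [bumpA_of_not_mem hx]

theorem bumpA_not_mem (s : List Int) (v : Int) : bumpA s v ∉ s := by
  refine bumpA.induct s (fun u => bumpA s u ∉ s) ?_ ?_ v
  · intro x hx ih; rw [bumpA_of_mem hx]; exact ih
  · intro x hx; rw [bumpA_of_not_mem hx]; exact hx

theorem bumpA_congr {s t : List Int} (hst : ∀ x, x ∈ s ↔ x ∈ t) (v : Int) :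
    bumpA s v = bumpA t v := by
  refine bumpA.induct s (fun u => bumpA s u = bumpA t u) ?_ ?_ v
  · intro x hx ih
    rw [bumpA_of_mem hx, bumpA_of_mem ((hst x).mp hx)]; exact ih
  · intro x hx
    rw [bumpA_of_not_mem hx, bumpA_of_not_mem (fun h => hx ((hst x).mpr h))]

theorem bumpA_mono {s t : List Int} (hst : ∀ x, x ∈ s → x ∈ t) (v : Int) :
    bumpA s v ≤ bumpA t v := by
  refine bumpA.induct t (fun u => bumpA s u ≤ bumpA t u) ?_ ?_ v
  · intro x hx ih
    by_cases hv : x ∈ s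
    · rw [bumpA_of_mem hv, bumpA_of_mem hx]; exact ih
    · rw [bumpA_of_not_mem hv, bumpA_of_mem hx]
      have := bumpA_ge t (x + 1); omega
  · intro x hx
    rw [bumpA_of_not_mem hx, bumpA_of_not_mem (fun h => hx (hst x h))]

theorem bumpA_between (s : List Int) (v : Int) :
    ∀ u, v ≤ u → u ≤ bumpA s v → bumpA s u = bumpA s v := by
  refine bumpA.induct s (fun v => ∀ u, v ≤ u → u ≤ bumpA s v → bumpA s u = bumpA s v) ?_ ?_ v
  · intro x hx ih u h1 h2
    rw [bumpA_of_mem hx] at h2 ⊢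
    by_cases hu : u = x
    · rw [hu, bumpA_of_mem hx]
    · exact ih u (by omega) h2
  · intro x hx u h1 h2
    rw [bumpA_of_not_mem hx] at h2
    have : u = x := by omega
    rw [this]

theorem chaseB_none {nxt : PySem.Dict Int Int} {v : Int} (h : nxt.get? v = none) :
    chaseB nxt v = (v, []) := by
  rw [chaseB]; split <;> simp_all

theorem chaseB_some {nxt : PySem.Dict Int Int} {v w : Int} (h : nxt.get? v = some w)
    (hw : v < w) : chaseB nxt v = ((chaseB nxt w).1, v :: (chaseB nxt w).2) := by
  rw [chaseB]; split <;> simp_all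

def InvB (nxt : PySem.Dict Int Int) : Prop :=
  ∀ k w, nxt.get? k = some w → k < w ∧ w ≤ bumpA nxt.keys k

theorem mem_keys_of_get?_some {nxt : PySem.Dict Int Int} {v w : Int}
    (h : nxt.get? v = some w) : v ∈ nxt.keys := by
  by_contra hc
  rw [← PySem.Dict.get?_eq_none_iff_not_mem_keys] at hc
  simp [hc] at h

theorem chaseB_spec (nxt : PySem.Dict Int Int) (hInv : InvB nxt) (v : Int) :
    (chaseB nxt v).1 = bumpA nxt.keys v ∧
    ∀ p ∈ (chaseB nxt v).2, p ∈ nxt.keys ∧ bumpA nxt.keys p = bumpA nxt.keys v := by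
  refine chaseB.induct nxt (fun v => (chaseB nxt v).1 = bumpA nxt.keys v ∧
    ∀ p ∈ (chaseB nxt v).2, p ∈ nxt.keys ∧ bumpA nxt.keys p = bumpA nxt.keys v) ?_ ?_ ?_ v
  · intro x h
    have hx : x ∉ nxt.keys := (PySem.Dict.get?_eq_none_iff_not_mem_keys nxt x).mp h
    rw [chaseB_none h]
    exact ⟨(bumpA_of_not_mem hx).symm, by simp⟩
  · intro x w h hw ih
    have hinv := hInv x w h
    have hx : x ∈ nxt.keys := mem_keys_of_get?_some h
    have heq : bumpA nxt.keys w = bumpA nxt.keys x :=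
      bumpA_between nxt.keys x w (by omega) hinv.2
    rw [chaseB_some h hw]
    refine ⟨ih.1.trans heq, ?_⟩
    intro p hp
    rcases List.mem_cons.mp hp with rfl | hp
    · exact ⟨hx, rfl⟩
    · exact ⟨(ih.2 p hp).1, ((ih.2 p hp).2).trans heq⟩
  · intro x w h hw
    exact absurd (hInv x w h).1 hw

theorem foldl_insert_keys (r : Int) (path : List Int) :
    ∀ (nxt : PySem.Dict Int Int), (∀ p ∈ path, p ∈ nxt.keys) →
    (path.foldl (fun d p => d.insert p r) nxt).keys = nxt.keys := by
  induction path with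
  | nil => intro nxt _; rfl
  | cons p ps ih =>
    intro nxt hmem
    simp only [List.foldl_cons]
    have hc : nxt.contains p = true :=
      (PySem.Dict.contains_iff_mem_keys nxt p).mpr (hmem p (List.mem_cons_self))
    have hk : (nxt.insert p r).keys = nxt.keys := PySem.Dict.keys_insert_of_contains nxt r hc
    rw [ih (nxt.insert p r) (fun q hq => by rw [hk]; exact hmem q (List.mem_cons_of_mem _ hq)), hk]

theorem foldl_insert_get? (r : Int) (path : List Int) :
    ∀ (nxt : PySem.Dict Int Int) (x w : Int),
    (path.foldl (fun d p => d.insert p r) nxt).get? x = some w →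
    nxt.get? x = some w ∨ (x ∈ path ∧ w = r) := by
  induction path with
  | nil => intro nxt x w h; exact Or.inl h
  | cons p ps ih =>
    intro nxt x w h
    simp only [List.foldl_cons] at h
    rcases ih (nxt.insert p r) x w h with h' | h'
    · by_cases hx : x = p
      · rw [hx, PySem.Dict.get?_insert_self] at h'
        exact Or.inr ⟨by rw [hx]; exact List.mem_cons_self, (Option.some.inj h').symm⟩
      · rw [PySem.Dict.get?_insert_of_ne nxt r hx] at h'
        exact Or.inl h'
    · exact Or.inr ⟨List.mem_cons_of_mem _ h'.1, h'.2⟩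

-- one loop step preserves the invariant and the seen/keys correspondence
theorem go_eq (col : List Int) :
    ∀ (seen : PySem.Set Int) (nxt : PySem.Dict Int Int),
    InvB nxt → (∀ x, x ∈ seen ↔ x ∈ nxt.keys) →
    goA seen col = goB nxt col := by
  induction col with
  | nil => intro seen nxt _ _; rfl
  | cons v rest ih =>
    intro seen nxt hInv hmem
    have hchase := chaseB_spec nxt hInv v
    have hrval : (chaseB nxt v).1 = bumpA nxt.keys v := hchase.1
    have hwA : bumpA seen v = (chaseB nxt v).1 := by rw [hrval]; exact bumpA_congr hmem v
    have hrnotkey : (chaseB nxt v).1 ∉ nxt.keys := by rw [hrval]; exact bumpA_not_mem _ _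
    have hkeys1 : ((chaseB nxt v).2.foldl (fun d p => d.insert p (chaseB nxt v).1) nxt).keys
        = nxt.keys :=
      foldl_insert_keys _ _ nxt (fun p hp => (hchase.2 p hp).1)
    set r := (chaseB nxt v).1 with hr
    set path := (chaseB nxt v).2 with hpath
    set nxt1 := path.foldl (fun d p => d.insert p r) nxt with hnxt1
    have hrc1 : nxt1.contains r = false := by
      rw [← Bool.not_eq_true]
      intro hc
      exact hrnotkey (hkeys1 ▸ (PySem.Dict.contains_iff_mem_keys nxt1 r).mp hc)
    have hkeys2 : (nxt1.insert r (r + 1)).keys = nxt.keys ++ [r] := by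
      rw [PySem.Dict.keys_insert_of_not_contains nxt1 (r + 1) hrc1, hkeys1]
    have hmem2 : ∀ x, x ∈ PySem.Set.add seen r ↔ x ∈ (nxt1.insert r (r + 1)).keys := by
      intro x
      rw [PySem.Set.mem_add, hkeys2]
      simp [hmem x]
    have hbump2 : ∀ k, bumpA nxt.keys k ≤ bumpA (nxt1.insert r (r + 1)).keys k := by
      intro k
      exact bumpA_mono (fun x hx => by rw [hkeys2]; exact List.mem_append_left _ hx) k
    have hInv2 : InvB (nxt1.insert r (r + 1)) := by
      intro k w hget
      by_cases hk : k = r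
      · rw [hk, PySem.Dict.get?_insert_self] at hget
        have hw' : w = r + 1 := (Option.some.inj hget).symm
        have hkm : k ∈ (nxt1.insert r (r + 1)).keys := by
          rw [hkeys2, hk]; exact List.mem_append_right _ (by simp)
        refine ⟨by omega, ?_⟩
        rw [bumpA_of_mem hkm, hw', hk]
        have := bumpA_ge (nxt1.insert r (r + 1)).keys (r + 1); omega
      · rw [PySem.Dict.get?_insert_of_ne nxt1 (r + 1) hk] at hget
        rcases foldl_insert_get? r path nxt k w hget with h' | h'
        · have hik := hInv k w h'
          exact ⟨hik.1, hik.2.trans (hbump2 k)⟩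
        · obtain ⟨hpmem, hwr⟩ := h'
          have hpk := hchase.2 k hpmem
          have hge := bumpA_ge nxt.keys k
          have hne : bumpA nxt.keys k ≠ k := by
            intro he; apply bumpA_not_mem nxt.keys k; rw [he]; exact hpk.1
          have hkr : bumpA nxt.keys k = r := hpk.2.trans hrval.symm
          have hlt : k < r := by omega
          refine ⟨by omega, ?_⟩
          rw [hwr]
          exact le_trans (le_of_eq hkr.symm) (hbump2 k)
    have hrec := ih (PySem.Set.add seen r) (nxt1.insert r (r + 1)) hInv2 hmem2
    simp only [goA, goB]
    rw [hwA, hrec]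

-- ===== VERDICT (by name: the statement is the Claim_ definition above) =====
theorem make_unique_spec : Claim_equal_make_unique := by
  intro column _
  unfold Spec_make_unique make_unique make_unique_alt
  exact go_eq column PySem.Set.empty PySem.Dict.empty
    (fun k w h => by simp [PySem.Dict.get?_empty] at h)
    (fun x => by simp [PySem.Set.empty, PySem.Dict.keys_empty])
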